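-- pv_equiv track=rewrite | github.com/Rvkstrauss/Python_projects | cyclopeptide_sequencing.py | get_linear_spec
-- ===== SOURCE A (Python) =====
-- def get_linear_spec(line):
--     subpeptides = [0]
--     for i in range(0,len(line)):
--         sum = 0
--         for j in range(i,len(line)):
--             sum += line[j]
--             subpeptides.append(sum)
--     return sorted(subpeptides)
-- ===== SOURCE B (Python) =====
-- def get_linear_spec(line):
--     # single pass DP: maintain the masses of subpeptides ENDING at the current residue
--     result = [0]
--     ending = []
--     for x in line:
--         ending = [x + s for s in ending]
--         ending.append(x)
--         result.extend(ending)
--     return sorted(result)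
-- ===== Notes on version B (the rewrite author's own statement) =====
-- stated objective: alternative
-- what changed: Replaces A's enumeration by start index with a fresh inner accumulation per start by a single left-to-right pass maintaining a DP list of the masses of all subpeptides ending at the current residue (each step extends every such mass by the new residue and appends the singleton), collecting them as it goes.
import Mathlib
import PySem

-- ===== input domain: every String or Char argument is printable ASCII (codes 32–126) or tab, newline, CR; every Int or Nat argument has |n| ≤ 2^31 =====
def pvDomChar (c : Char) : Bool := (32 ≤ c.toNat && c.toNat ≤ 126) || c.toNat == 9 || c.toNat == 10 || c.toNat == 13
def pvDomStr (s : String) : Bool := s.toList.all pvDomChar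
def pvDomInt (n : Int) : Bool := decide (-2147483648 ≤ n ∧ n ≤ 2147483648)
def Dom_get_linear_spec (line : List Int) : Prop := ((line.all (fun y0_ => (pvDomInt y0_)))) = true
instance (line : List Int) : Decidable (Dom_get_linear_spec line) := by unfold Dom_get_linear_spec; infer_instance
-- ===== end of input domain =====

-- B replaces A's per-start fresh accumulation by a single pass maintaining the DP list of
-- subpeptide masses ending at the current residue (alternative decomposition, same asymptotic cost).


-- ===== PORT A =====
def get_linear_spec (line : List Int) : List Int :=
  PySem.List.sorted
    ((PySem.List.pyRange 0 (line.length : Int)).foldl (fun subs i =>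
      ((PySem.List.pyRange i (line.length : Int)).foldl
        (fun (p : List Int × Int) j =>
          (p.1 ++ [p.2 + PySem.List.pyGetD line j 0], p.2 + PySem.List.pyGetD line j 0))
        (subs, 0)).1) [0])
    (fun x => x)

-- ===== PORT B =====
def get_linear_spec_alt (line : List Int) : List Int :=
  PySem.List.sorted
    ((line.foldl
        (fun (p : List Int × List Int) x =>
          (p.1 ++ (p.2.map (fun s => x + s) ++ [x]), p.2.map (fun s => x + s) ++ [x]))
        ([0], [])).1)
    (fun x => x)

-- ===== PRECONDITION & SPEC =====
def Spec_get_linear_spec (line : List Int) (out : List Int) : Prop := out = get_linear_spec_alt line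
instance (line : List Int) (out : List Int) : Decidable (Spec_get_linear_spec line out) := by unfold Spec_get_linear_spec; infer_instance

-- ===== CLAIM (what is proved, stated in full; the proofs are below) =====
def Claim_equal_get_linear_spec : Prop := ∀ (line : List Int), Dom_get_linear_spec line → Spec_get_linear_spec line (get_linear_spec line)

-- ===== LEMMAS AND PROOFS =====

/-- prefix sum -/
def pvP (l : List Int) (k : Nat) : Int := (l.take k).sum

/-- A's collected masses (besides the initial 0), grouped by start index. -/
def pvAtail (l : List Int) : List Int :=
  (List.range l.length).flatMap (fun i =>
    (List.range (l.length - i)).map (fun j => pvP l (i + j + 1) - pvP l i))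

/-- B's collected masses (besides the initial 0), grouped by end index. -/
def pvBtail (l : List Int) : List Int :=
  (List.range l.length).flatMap (fun k =>
    (List.range (k + 1)).map (fun i => pvP l (k + 1) - pvP l i))

/-- B's "ending" DP list after the whole input. -/
def pvEndsFn (l : List Int) : List Int :=
  (List.range l.length).map (fun i => pvP l l.length - pvP l i)

/-- The running sums produced by A's inner accumulation, starting from `s`. -/
def pvRuns : List Int → Int → List Int
  | [], _ => []
  | x :: t, s => (s + x) :: pvRuns t (s + x)

theorem pvFoldl_acc (ys : List Int) (acc : List Int) (s : Int) :
    ys.foldl (fun (p : List Int × Int) x => (p.1 ++ [p.2 + x], p.2 + x)) (acc, s)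
      = (acc ++ pvRuns ys s, s + ys.sum) := by
  induction ys generalizing acc s with
  | nil => simp [pvRuns]
  | cons x t ih =>
      simp only [List.foldl_cons, pvRuns, ih, List.sum_cons]
      rw [Prod.mk.injEq]
      constructor
      · simp
      · ring

theorem pvRuns_eq_map (ys : List Int) (s : Int) :
    pvRuns ys s = (List.range ys.length).map (fun k => s + (ys.take (k + 1)).sum) := by
  induction ys generalizing s with
  | nil => simp [pvRuns]
  | cons x t ih =>
      simp only [pvRuns, List.length_cons, List.range_succ_eq_map, List.map_cons, List.map_map, ih]
      rw [List.cons_eq_cons]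
      constructor
      · simp
      · apply List.map_congr_left
        intro k _
        simp [Nat.succ_eq_add_one, List.take_succ_cons, Function.comp]
        ring

theorem pvTake_drop_sum (line : List Int) (m k : Nat) :
    ((line.drop m).take k).sum = (line.take (m + k)).sum - (line.take m).sum := by
  rw [List.take_add, List.sum_append]
  ring

/-- A's pre-sort list is `0 :: pvAtail`. -/
theorem pvA_unsorted (l : List Int) :
    (PySem.List.pyRange 0 (l.length : Int)).foldl (fun subs i =>
      ((PySem.List.pyRange i (l.length : Int)).foldl
        (fun (p : List Int × Int) j =>
          (p.1 ++ [p.2 + PySem.List.pyGetD l j 0], p.2 + PySem.List.pyGetD l j 0))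
        (subs, 0)).1) [0]
    = 0 :: pvAtail l := by
  rw [PySem.List.foldl_congr_mem _ _
    (fun subs i => subs ++ pvRuns (l.drop i.toNat) 0) [0]
    (by
      intro subs i hi
      have h0 : (0:Int) ≤ i := (PySem.List.mem_pyRange_one.mp hi).1
      rw [PySem.List.foldl_pyRange_pyGetD' l 0
        (fun (p : List Int × Int) v => (p.1 ++ [p.2 + v], p.2 + v)) (subs, 0) h0]
      rw [pvFoldl_acc])]
  rw [PySem.List.foldl_append_eq_flatMap]
  show _ = [0] ++ pvAtail l
  congr 1
  rw [pvAtail, PySem.List.pyRange_one]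
  simp only [Int.sub_zero, Int.toNat_natCast, List.flatMap_map]
  apply List.flatMap_congr
  intro i hi
  have hilt : i < l.length := List.mem_range.mp hi
  simp only [Int.zero_add, Int.toNat_natCast]
  rw [pvRuns_eq_map]
  have hdlen : (l.drop i).length = l.length - i := by simp
  rw [hdlen]
  apply List.map_congr_left
  intro j _
  rw [pvTake_drop_sum l i (j + 1)]
  simp only [pvP]
  have : i + (j + 1) = i + j + 1 := by omega
  rw [this]
  ring

/-- pvP is stable under appending on the right, below the length. -/
theorem pvP_append (l : List Int) (x : Int) (k : Nat) (hk : k ≤ l.length) :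
    pvP (l ++ [x]) k = pvP l k := by
  simp [pvP, List.take_append_of_le_length hk]

theorem pvP_append_last (l : List Int) (x : Int) :
    pvP (l ++ [x]) (l.length + 1) = pvP l l.length + x := by
  rw [pvP, pvP, List.take_of_length_le (by simp), List.take_of_length_le (le_refl _)]
  simp

/-- B's fold, characterized by reverse induction. -/
theorem pvB_foldl (l : List Int) :
    l.foldl
      (fun (p : List Int × List Int) x =>
        (p.1 ++ (p.2.map (fun s => x + s) ++ [x]), p.2.map (fun s => x + s) ++ [x]))
      ([0], [])
    = (0 :: pvBtail l, pvEndsFn l) := by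
  induction l using List.reverseRecOn with
  | nil => simp [pvBtail, pvEndsFn]
  | append_singleton l x ih =>
      rw [List.foldl_append, ih]
      simp only [List.foldl_cons, List.foldl_nil]
      have hends : (pvEndsFn l).map (fun s => x + s) ++ [x] = pvEndsFn (l ++ [x]) := by
        rw [pvEndsFn, pvEndsFn, List.length_append, List.length_singleton,
          List.range_succ, List.map_append, List.map_map]
        congr 1
        · apply List.map_congr_left
          intro i hi
          have : i < l.length := List.mem_range.mp hi
          simp only [Function.comp]
          rw [pvP_append l x i (by omega), pvP_append_last]
          ring
        · simp [pvP_append_last, pvP_append l x l.length (le_refl _)]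
      rw [Prod.mk.injEq]
      refine ⟨?_, hends⟩
      have hBapp : pvBtail (l ++ [x]) = pvBtail l ++ pvEndsFn (l ++ [x]) := by
        rw [pvBtail, List.length_append, List.length_singleton, List.range_succ,
          List.flatMap_append]
        simp only [List.flatMap_singleton]
        have hblocks : (List.range l.length).flatMap (fun k =>
            (List.range (k + 1)).map (fun i => pvP (l ++ [x]) (k + 1) - pvP (l ++ [x]) i))
            = pvBtail l := by
          rw [pvBtail]
          apply List.flatMap_congr
          intro k hk
          have hklt : k < l.length := List.mem_range.mp hk
          apply List.map_congr_left
          intro i hi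
          have : i < k + 1 := List.mem_range.mp hi
          rw [pvP_append l x (k+1) (by omega), pvP_append l x i (by omega)]
        have htail : (List.range (l.length + 1)).map
            (fun i => pvP (l ++ [x]) (l.length + 1) - pvP (l ++ [x]) i)
            = pvEndsFn (l ++ [x]) := by
          rw [pvEndsFn, List.length_append, List.length_singleton]
        rw [hblocks, htail]
      rw [hBapp, hends]
      simp

/-- lists over ranges as multisets -/
theorem pvCoe_map_range (n : Nat) (g : Nat → Int) :
    ((List.range n).map g : Multiset Int) = ∑ i ∈ Finset.range n, ({g i} : Multiset Int) := by
  induction n with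
  | zero => simp
  | succ n ih =>
      rw [List.range_succ, List.map_append, Finset.sum_range_succ, ← ih,
        ← Multiset.coe_singleton, ← Multiset.coe_add]
      simp

theorem pvCoe_flatMap_range (n : Nat) (g : Nat → List Int) :
    ((List.range n).flatMap g : Multiset Int) = ∑ i ∈ Finset.range n, (g i : Multiset Int) := by
  induction n with
  | zero => simp
  | succ n ih =>
      rw [List.range_succ, List.flatMap_append, Finset.sum_range_succ, ← ih,
        ← Multiset.coe_add]
      simp

/-- The two groupings collect the same multiset of masses. -/
theorem pvA_perm_B (l : List Int) : (pvAtail l).Perm (pvBtail l) := by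
  rw [← Multiset.coe_eq_coe]
  rw [pvAtail, pvBtail, pvCoe_flatMap_range, pvCoe_flatMap_range]
  have hA : ∀ i, ((((List.range (l.length - i)).map
        (fun j => pvP l (i + j + 1) - pvP l i)) : List Int) : Multiset Int)
      = ∑ k ∈ Finset.Ico i l.length, ({pvP l (k + 1) - pvP l i} : Multiset Int) := by
    intro i
    rw [pvCoe_map_range, Finset.sum_Ico_eq_sum_range]
  have hB : ∀ k, ((((List.range (k + 1)).map
        (fun i => pvP l (k + 1) - pvP l i)) : List Int) : Multiset Int)
      = ∑ i ∈ Finset.range (k + 1), ({pvP l (k + 1) - pvP l i} : Multiset Int) := by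
    intro k
    rw [pvCoe_map_range]
  calc ∑ i ∈ Finset.range l.length, ((((List.range (l.length - i)).map
          (fun j => pvP l (i + j + 1) - pvP l i)) : List Int) : Multiset Int)
      = ∑ i ∈ Finset.Ico 0 l.length, ∑ k ∈ Finset.Ico i l.length,
          ({pvP l (k + 1) - pvP l i} : Multiset Int) := by
        rw [← Finset.range_eq_Ico]
        exact Finset.sum_congr rfl (fun i _ => hA i)
    _ = ∑ k ∈ Finset.Ico 0 l.length, ∑ i ∈ Finset.Ico 0 (k + 1),
          ({pvP l (k + 1) - pvP l i} : Multiset Int) :=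
        Finset.sum_Ico_Ico_comm 0 l.length (fun i k => {pvP l (k + 1) - pvP l i})
    _ = ∑ k ∈ Finset.range l.length, ((((List.range (k + 1)).map
          (fun i => pvP l (k + 1) - pvP l i)) : List Int) : Multiset Int) := by
        rw [← Finset.range_eq_Ico]
        exact Finset.sum_congr rfl (fun k _ => (hB k).symm)

-- ===== VERDICT (by name: the statement is the Claim_ definition above) =====
theorem get_linear_spec_spec : Claim_equal_get_linear_spec := by
  intro line _
  show get_linear_spec line = get_linear_spec_alt line
  unfold get_linear_spec get_linear_spec_alt
  rw [pvA_unsorted, pvB_foldl]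
  exact PySem.List.sorted_eq_sorted_of_perm _ _ _ Function.injective_id
    ((pvA_perm_B line).cons 0)
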